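-- pv_equiv track=rewrite | github.com/jaakkopee/sanaverkko | sanaVerkkoCore.py | _phoneme_rhyme_tail
-- ===== SOURCE A (Python) =====
-- def _phoneme_rhyme_tail(phonemes):
--     if not phonemes:
--         return ()
--
--     vowel_phones = {
--         "a", "e", "i", "o", "u", "y", "ae", "oe",
--         "ah", "aa", "ai", "ei", "oi", "au", "ou",
--         "er", "ar", "or", "ur", "ir", "un",
--     }
--     for index in range(len(phonemes) - 1, -1, -1):
--         if phonemes[index] in vowel_phones:
--             return phonemes[index:]
--
--     return phonemes
-- ===== SOURCE B (Python) =====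
-- def _phoneme_rhyme_tail(phonemes):
--     if not phonemes:
--         return ()
--
--     vowel_phones = {
--         "a", "e", "i", "o", "u", "y", "ae", "oe",
--         "ah", "aa", "ai", "ei", "oi", "au", "ou",
--         "er", "ar", "or", "ur", "ir", "un",
--     }
--     # Pass 1: count the vowel phonemes.
--     total = sum(1 for p in phonemes if p in vowel_phones)
--     if total == 0:
--         return phonemes
--     # Pass 2: collect output element by element; a running vowel counter
--     # reaches `total` exactly at the last vowel phoneme, from which point
--     # every element (including it) belongs to the tail.
--     result = []
--     seen = 0
--     for p in phonemes:
--         if p in vowel_phones: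
--             seen += 1
--         if seen == total:
--             result.append(p)
--     return result
-- ===== Notes on version B (the rewrite author's own statement) =====
-- stated objective: alternative
-- what changed: B never searches for or slices at an index: it counts the vowel phonemes in one pass, and if any exist makes a second pass with a running vowel counter, appending elements to the output from the moment the counter reaches the total (i.e. at the last vowel), building the tail element by element instead of locating the last vowel index and slicing.
import Mathlib
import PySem

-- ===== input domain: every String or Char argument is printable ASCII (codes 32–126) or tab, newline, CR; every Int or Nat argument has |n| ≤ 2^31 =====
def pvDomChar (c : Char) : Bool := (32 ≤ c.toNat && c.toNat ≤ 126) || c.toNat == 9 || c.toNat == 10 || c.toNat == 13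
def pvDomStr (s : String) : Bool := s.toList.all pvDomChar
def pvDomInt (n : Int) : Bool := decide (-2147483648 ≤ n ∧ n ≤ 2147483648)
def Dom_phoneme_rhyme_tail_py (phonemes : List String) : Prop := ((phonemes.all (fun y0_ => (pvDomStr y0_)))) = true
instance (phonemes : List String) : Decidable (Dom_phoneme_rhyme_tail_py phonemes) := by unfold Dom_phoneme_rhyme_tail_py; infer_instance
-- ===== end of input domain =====

-- B is a count-then-collect re-implementation: one pass counts the vowel phonemes, a second pass
-- appends elements once the running counter reaches the total (the last vowel), instead of
-- locating the last vowel index backwards and slicing (alternative algorithm, same cost).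


-- the Python set literal of vowel phonemes (shared by both sources)
def pvVowelPhones : PySem.Set String :=
  PySem.Set.ofList
    ["a", "e", "i", "o", "u", "y", "ae", "oe",
     "ah", "aa", "ai", "ei", "oi", "au", "ou",
     "er", "ar", "or", "ur", "ir", "un"]

-- Python's 'p in vowel_phones' (used by both sources)
def pvP (p : String) : Bool := pvVowelPhones.contains p

-- ===== PORT A =====
-- A's 'for index in range(len(phonemes)-1, -1, -1)' with early return:
-- recursion over the countdown index list; pyGet? is total here since every index is in range.
def pvALoop (phonemes : List String) : List Int → List String
  | [] => phonemes
  | i :: rest =>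
    match PySem.List.pyGet? phonemes i with
    | none => []   -- unreachable: i comes from range(len-1, -1, -1)
    | some p =>
      if pvP p then PySem.List.slice phonemes (some i) none
      else pvALoop phonemes rest

def phoneme_rhyme_tail_py (phonemes : List String) : List String :=
  if phonemes = [] then []   -- Python returns (); empty tuple = empty list under the convention
  else pvALoop phonemes (PySem.List.pyRange ((phonemes.length : Int) - 1) (-1) (-1))

-- ===== PORT B =====
-- pass 1: total = sum(1 for p in phonemes if p in vowel_phones)
def pvBTotal (phonemes : List String) : Int :=
  phonemes.foldl (fun acc p => if pvP p then acc + 1 else acc) 0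

-- pass 2: running counter + append once it reaches total
def pvBCollect (total : Int) (phonemes : List String) : Int × List String :=
  phonemes.foldl
    (fun (st : Int × List String) p =>
      let seen := if pvP p then st.1 + 1 else st.1
      (seen, if seen = total then st.2 ++ [p] else st.2))
    (0, [])

def phoneme_rhyme_tail_py_alt (phonemes : List String) : List String :=
  if phonemes = [] then []
  else
    let total := pvBTotal phonemes
    if total = 0 then phonemes
    else (pvBCollect total phonemes).2

-- ===== PRECONDITION & SPEC =====
def Spec_phoneme_rhyme_tail_py (phonemes : List String) (out : List String) : Prop := out = phoneme_rhyme_tail_py_alt phonemes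
instance (phonemes : List String) (out : List String) : Decidable (Spec_phoneme_rhyme_tail_py phonemes out) := by unfold Spec_phoneme_rhyme_tail_py; infer_instance

-- ===== CLAIM =====
def Claim_equal_phoneme_rhyme_tail_py : Prop := ∀ (phonemes : List String), Dom_phoneme_rhyme_tail_py phonemes → Spec_phoneme_rhyme_tail_py phonemes (phoneme_rhyme_tail_py phonemes)

-- ===== LEMMAS AND PROOFS =====

-- index of the last vowel phoneme (proof-side reference; neither port computes this)
def pvLastIdx : List String → Option Nat
  | [] => none
  | x :: xs =>
    match pvLastIdx xs with
    | some i => some (i + 1)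
    | none => if pvP x then some 0 else none

theorem pvLastIdx_append_singleton (u : List String) (a : String) :
    pvLastIdx (u ++ [a]) = if pvP a then some u.length else pvLastIdx u := by
  induction u with
  | nil => cases h : pvP a <;> simp [pvLastIdx, h]
  | cons x t ih =>
    simp only [List.cons_append, pvLastIdx, ih]
    cases h : pvP a
    · simp
    · simp

theorem pvLastIdx_none_iff (xs : List String) :
    pvLastIdx xs = none ↔ xs.countP pvP = 0 := by
  induction xs with
  | nil => simp [pvLastIdx]
  | cons x t ih =>
    simp only [pvLastIdx, List.countP_cons]
    cases h : pvLastIdx t with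
    | some i => simp [ih.symm, h]
    | none =>
      have hc : t.countP pvP = 0 := ih.mp h
      cases hx : pvP x <;> simp [hx, hc]

theorem pvBTotal_general (l : List String) :
    ∀ a : Int,
      l.foldl (fun acc p => if pvP p then acc + 1 else acc) a = a + (l.countP pvP : Int) := by
  induction l with
  | nil => intro a; simp
  | cons x t ih =>
    intro a
    rw [List.foldl_cons]
    cases hx : pvP x <;>
      simp only [hx, Bool.false_eq_true, if_false, if_true] <;>
      rw [ih] <;> simp [List.countP_cons, hx] <;> push_cast <;> ring

theorem pvBTotal_eq (xs : List String) : pvBTotal xs = (xs.countP pvP : Int) := by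
  unfold pvBTotal; rw [pvBTotal_general]; ring

-- A's countdown loop returns the drop at the last vowel index among the first k elements
theorem pvALoop_eq (xs : List String) :
    ∀ k : Nat, k ≤ xs.length →
      pvALoop xs (PySem.List.pyRange ((k : Int) - 1) (-1) (-1)) =
        (match pvLastIdx (xs.take k) with
         | none => xs
         | some i => xs.drop i) := by
  intro k
  induction k with
  | zero => intro _; simp [pvALoop, pvLastIdx]
  | succ k ih =>
    intro hk
    have hklt : k < xs.length := hk
    have hcons : PySem.List.pyRange (((k : Int) + 1) - 1) (-1) (-1) =
        (k : Int) :: PySem.List.pyRange ((k : Int) - 1) (-1) (-1) := by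
      have := PySem.List.pyRange_neg_one_cons (a := (k : Int)) (b := (-1 : Int)) (by omega)
      simpa using this
    have hget : PySem.List.pyGet? xs ((k : Int)) = some xs[k] := by simp [hklt]
    have htake : xs.take (k + 1) = xs.take k ++ [xs[k]] := List.take_succ_eq_append_getElem hklt
    have hlen : (xs.take k).length = k := List.length_take_of_le (le_of_lt hklt)
    push_cast
    rw [hcons, pvALoop, hget, htake, pvLastIdx_append_singleton, hlen]
    cases hv : pvP xs[k]
    · simp only [hv, Bool.false_eq_true, if_false]
      exact ih (le_of_lt hklt)
    · simp only [hv, if_true]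
      exact PySem.List.slice_from_natCast xs k

-- B's second pass: from state (seen, acc) with seen + count of the rest = total,
-- it appends exactly the tail from the last vowel (or all of xs when seen is already total)
theorem pvBCollect_general (total : Int) (xs : List String) :
    ∀ (seen : Int) (acc : List String),
      seen + (xs.countP pvP : Int) = total →
      (xs.foldl
        (fun (st : Int × List String) p =>
          let seen := if pvP p then st.1 + 1 else st.1
          (seen, if seen = total then st.2 ++ [p] else st.2))
        (seen, acc)).2 =
        acc ++ (match pvLastIdx xs with
                | none => xs
                | some i => xs.drop i) := by
  induction xs with
  | nil =>
    intro seen acc h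
    simp [pvLastIdx]
  | cons x t ih =>
    intro seen acc h
    simp only [List.countP_cons] at h
    simp only [List.foldl_cons, pvLastIdx]
    cases hx : pvP x
    · simp only [Bool.false_eq_true, if_false]
      have h' : seen + (t.countP pvP : Int) = total := by
        rw [hx] at h; push_cast at h ⊢; omega
      cases ht : pvLastIdx t with
      | none =>
        have hc : t.countP pvP = 0 := (pvLastIdx_none_iff t).mp ht
        have hseen : seen = total := by rw [hc] at h'; simpa using h'
        rw [if_pos hseen, ih seen (acc ++ [x]) h', ht]
        simp
      | some j =>
        have hc : 0 < t.countP pvP := by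
          by_contra hcn
          exact absurd ((pvLastIdx_none_iff t).mpr (by omega)) (by simp [ht])
        have hne : ¬ (seen = total) := by intro he; rw [he] at h'; omega
        rw [if_neg hne, ih seen acc h', ht]
        simp
    · simp only [hx, if_true]
      have h' : (seen + 1) + (t.countP pvP : Int) = total := by
        simp only [hx, if_true] at h; push_cast at h; omega
      cases ht : pvLastIdx t with
      | none =>
        have hc : t.countP pvP = 0 := (pvLastIdx_none_iff t).mp ht
        have hseen : seen + 1 = total := by rw [hc] at h'; simpa using h'
        rw [if_pos hseen, ih (seen + 1) (acc ++ [x]) h', ht]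
        simp
      | some j =>
        have hc : 0 < t.countP pvP := by
          by_contra hcn
          exact absurd ((pvLastIdx_none_iff t).mpr (by omega)) (by simp [ht])
        have hne : ¬ (seen + 1 = total) := by intro he; rw [he] at h'; omega
        rw [if_neg hne, ih (seen + 1) acc h', ht]
        simp

-- ===== VERDICT =====
theorem phoneme_rhyme_tail_py_spec : Claim_equal_phoneme_rhyme_tail_py := by
  intro xs _
  unfold Spec_phoneme_rhyme_tail_py phoneme_rhyme_tail_py phoneme_rhyme_tail_py_alt
  by_cases h : xs = []
  · simp [h]
  · rw [if_neg h, if_neg h]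
    have hA := pvALoop_eq xs xs.length le_rfl
    rw [List.take_length] at hA
    rw [hA, pvBTotal_eq]
    by_cases h0 : xs.countP pvP = 0
    · rw [(pvLastIdx_none_iff xs).mpr h0]
      simp [h0]
    · have hne : ¬ ((xs.countP pvP : Int) = 0) := by exact_mod_cast h0
      rw [if_neg hne]
      unfold pvBCollect
      rw [pvBCollect_general ((xs.countP pvP : Int)) xs 0 [] (by omega)]
      cases hL : pvLastIdx xs with
      | none => exact absurd ((pvLastIdx_none_iff xs).mp hL) h0
      | some i => simp
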